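-- pv_equiv track=rewrite | github.com/sungodemk/CAPSULRAG | capsule_demo/modules/security.py | check_acl_permission
-- ===== SOURCE A (Python) =====
-- from typing import List, Dict, Tuple, Any, Optional
--
-- def check_acl_permission(acl: List[str], user_permissions: List[str], required_action: str) -> bool:
--     """Check if user has required permission based on ACL and user permissions."""
--     # Simple ACL matching - in production would be more sophisticated
--     required_perms = [perm for perm in acl if perm.endswith(f":{required_action}")]
--     if not required_perms:
--         return True  # No specific requirements
--
--     # Check if user has any of the required permissions
--     for req_perm in required_perms:
--         if req_perm in user_permissions:
--             return True
--
--     return False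
-- ===== SOURCE B (Python) =====
-- def check_acl_permission(acl, user_permissions, required_action):
--     """Check if user has required permission based on ACL and user permissions."""
--     suffix = ":" + required_action
--     acl_set = set(acl)
--     # Drive the search from the user's granted permissions instead of the ACL.
--     for granted in user_permissions:
--         if granted.endswith(suffix) and granted in acl_set:
--             return True
--     # No granted permission satisfies the ACL; allow only if nothing was required.
--     for perm in acl:
--         if perm.endswith(suffix):
--             return False
--     return True
-- ===== Notes on version B (the rewrite author's own statement) =====
-- stated objective: faster
-- what changed: Inverts the traversal: B scans user_permissions once, checking each granted permission's suffix and membership in a hash set built from acl (so A's filter pass and its inner 'req_perm in user_permissions' list scan disappear), then only if nothing matched scans acl once for whether any requirement exists.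
import Mathlib
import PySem

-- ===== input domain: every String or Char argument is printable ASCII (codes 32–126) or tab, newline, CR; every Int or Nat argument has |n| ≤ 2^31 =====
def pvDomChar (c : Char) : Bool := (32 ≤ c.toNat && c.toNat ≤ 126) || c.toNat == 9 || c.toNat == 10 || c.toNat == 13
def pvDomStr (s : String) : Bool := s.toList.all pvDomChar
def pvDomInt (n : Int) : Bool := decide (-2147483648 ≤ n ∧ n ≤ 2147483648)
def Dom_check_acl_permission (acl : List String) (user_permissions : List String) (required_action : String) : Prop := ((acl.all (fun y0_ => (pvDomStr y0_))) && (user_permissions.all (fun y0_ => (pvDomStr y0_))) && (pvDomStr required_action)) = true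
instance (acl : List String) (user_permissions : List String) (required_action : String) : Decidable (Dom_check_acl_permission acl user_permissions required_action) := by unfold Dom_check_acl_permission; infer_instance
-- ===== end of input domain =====

-- B inverts the traversal: it scans user_permissions against a set built from acl, then checks acl for any requirement; return value equivalence with A is proved.


-- ===== PORT A =====
def aLoop (req_perms : List String) (user_permissions : List String) : Bool :=
  match req_perms with
  | [] => false
  | req_perm :: rest =>
    if user_permissions.contains req_perm then true else aLoop rest user_permissions

def check_acl_permission (acl : List String) (user_permissions : List String) (required_action : String) : Bool :=
  let required_perms := acl.filter (fun perm => PySem.Str.endswith perm (":" ++ required_action))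
  if required_perms.isEmpty then true
  else aLoop required_perms user_permissions

-- ===== PORT B =====
-- first loop of B: scan the granted permissions against the acl set
def bGrant (user_permissions : List String) (suffix : String) (acl_set : PySem.Set String) : Bool :=
  match user_permissions with
  | [] => false
  | granted :: rest =>
    if PySem.Str.endswith granted suffix && PySem.Set.contains acl_set granted then true
    else bGrant rest suffix acl_set

-- second loop of B: does the acl require anything at all?
def bReq (acl : List String) (suffix : String) : Bool :=
  match acl with
  | [] => true
  | perm :: rest => if PySem.Str.endswith perm suffix then false else bReq rest suffix

def check_acl_permission_alt (acl : List String) (user_permissions : List String) (required_action : String) : Bool :=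
  let suffix := ":" ++ required_action
  let acl_set := PySem.Set.ofList acl
  if bGrant user_permissions suffix acl_set then true
  else bReq acl suffix

-- ===== PRECONDITION & SPEC =====
def Spec_check_acl_permission (acl : List String) (user_permissions : List String) (required_action : String) (out : Bool) : Prop := out = check_acl_permission_alt acl user_permissions required_action
instance (acl : List String) (user_permissions : List String) (required_action : String) (out : Bool) : Decidable (Spec_check_acl_permission acl user_permissions required_action out) := by unfold Spec_check_acl_permission; infer_instance

-- ===== CLAIM (what is proved, stated in full; the proofs are below) =====
def Claim_equal_check_acl_permission : Prop := ∀ (acl : List String) (user_permissions : List String) (required_action : String), Dom_check_acl_permission acl user_permissions required_action → Spec_check_acl_permission acl user_permissions required_action (check_acl_permission acl user_permissions required_action)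

-- ===== LEMMAS AND PROOFS =====
lemma aLoop_eq_any (l ups : List String) :
    aLoop l ups = l.any (fun p => ups.contains p) := by
  induction l with
  | nil => rfl
  | cons x rest ih => simp only [aLoop, ih, List.any_cons]; cases ups.contains x <;> simp

lemma bGrant_eq_any (ups : List String) (suffix : String) (s : PySem.Set String) :
    bGrant ups suffix s = ups.any (fun g => PySem.Str.endswith g suffix && PySem.Set.contains s g) := by
  induction ups with
  | nil => rfl
  | cons g rest ih =>
    simp only [bGrant, ih, List.any_cons]
    cases (PySem.Str.endswith g suffix && PySem.Set.contains s g) <;> simp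

lemma bReq_eq_any (acl : List String) (suffix : String) :
    bReq acl suffix = !(acl.any (fun p => PySem.Str.endswith p suffix)) := by
  induction acl with
  | nil => rfl
  | cons p rest ih => simp only [bReq, ih, List.any_cons]; cases PySem.Str.endswith p suffix <;> simp

-- the two search loops find a witness for the same existential, just from opposite sides
lemma swap_any (acl ups : List String) (suffix : String) :
    (acl.filter (fun p => PySem.Str.endswith p suffix)).any (fun p => ups.contains p)
      = ups.any (fun g => PySem.Str.endswith g suffix && PySem.Set.contains (PySem.Set.ofList acl) g) := by
  rw [Bool.eq_iff_iff]
  simp only [List.any_eq_true, List.mem_filter, List.contains_iff_mem,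
    PySem.Set.contains_iff, PySem.Set.mem_ofList, Bool.and_eq_true]
  constructor
  · rintro ⟨p, ⟨hpa, hpe⟩, hpu⟩; exact ⟨p, hpu, hpe, hpa⟩
  · rintro ⟨g, hgu, hge, hga⟩; exact ⟨g, ⟨hga, hge⟩, hgu⟩

-- ===== VERDICT (by name: the statement is the Claim_ definition above) =====
theorem check_acl_permission_spec : Claim_equal_check_acl_permission := by
  intro acl ups act _
  unfold Spec_check_acl_permission check_acl_permission check_acl_permission_alt
  simp only []
  rw [aLoop_eq_any, bGrant_eq_any, bReq_eq_any, swap_any]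
  have hiso : (acl.filter (fun p => PySem.Str.endswith p (":" ++ act))).isEmpty
      = !(acl.any (fun p => PySem.Str.endswith p (":" ++ act))) := by
    rw [Bool.eq_iff_iff]
    simp [List.isEmpty_iff, List.filter_eq_nil_iff]
  rw [hiso]
  cases acl.any (fun p => PySem.Str.endswith p (":" ++ act)) <;>
    cases ups.any (fun g => PySem.Str.endswith g (":" ++ act) && PySem.Set.contains (PySem.Set.ofList acl) g) <;>
      simp
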